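/-
  THE CONTRACTS OF THE HEAP (c/heap/heap.c): `Spec`s (UserX/Contract.lean) over the heap's invariant (Asan/Heap.lean).
  Program-independent: the one thing of a program that occurs is its text record `T : ProgX.Text` (through `ShadowPre T`), as in
  ProgX/Spec/Libc.lean. (Written by agent GA as Asan/HeapSpec.lean over a copy of the vocabulary, Asan/Live.lean, with a parameter
  `T : Nat`; here over THE vocabulary, ProgX/Spec/Basic.lean. `LiveIn` through `malloc` / `free` / in-place `realloc`: §0.)

  GHOST PARAMETERS of every Spec: `T`, the heap `H`, the other live objects `rest` (globals, input, output: everything live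
  that is neither a stack object nor a heap object), the active protected frames `frames`. `free`, `realloc`, `reallocarray` add the
  size `n` of the object they are called for.

      HeapPre T H rest frames u     the common precondition: `HeapInv H rest frames (rsp + 8) u.mem`; the heap is where heap.c puts it
                                         (`[800000H, C00000H)`); no object of `rest`, and no heap object, lies in the text
      HeapPre.shadowPre                  … which gives the shadow clause `ShadowPre T (H.liveObjs ++ rest) frames u` every other
                                         contract asks for: a client passes ONE fact through all its calls

      heap_alloc.spec      rdi = n, rsi = c         (static `heap_alloc`) `H.Fits c`: rax = H.next, the heap is `H.push n c` (one more LIVE object of exactly n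
                                                  bytes, capacity c, contents arbitrary); otherwise `FailPost`: rax = 0, NOTHING but stack written
      malloc.spec         rdi = n                  the same with c = r16 n
      calloc.spec         rdi = k, rsi = s         the same for n = k · s (the product of the NUMBERS: a product that does not fit 64 bits does
                                                  not fit the heap either), and the n bytes are 0
      free.spec n         rdi = p                  p = 0: nothing. `H.Live p n`: the heap is `H.release p` (that object FREED, every other as it was:
                                                  `Heap.Live.release_ne`, `free_keeps`)
      realloc.spec n c    rdi = p, rsi = m         p = 0: as malloc(m). `H.LiveCap p n c`: THREE outcomes (`ReallocPost`, `ReallocPost.cases`):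
                                                  in place (r16 m ≤ c: same address, the heap is `H.resize p m`), moved (rax = H.next, the heap is
                                                  `(H.push m c').release p`, the n bytes copied), failed (`FailPost`: the old object live, untouched)
      reallocarray.spec n c      rdi = p, rsi = k, rdx = s      the same for m = k · s
      heap_live_size.spec n     rdi = p                  (static helper `heap_live_size`) `H.Live p n`: rax = n, memory unchanged
      heap_product_ok.spec      rdi = k, rsi = s         (static helper `heap_product_ok`) 1 if a factor is 0 or both are ≤ ROOM, else 0

  THE REPORT ROUTINE. `free` / `realloc` of a pointer that is neither NULL nor the start of a LIVE object call `__asan_report`. The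
  contracts exclude that by their precondition (`p = 0 ∨ H.Live p n`), exactly as a check's contract excludes a bad address; the
  invariant of the way of every `Calls` says RIP is never at the report routine.

  SIZE 0. `malloc(0)`, `calloc` with a zero product: a live object of size 0 in a chunk of 64 bytes (nothing accessible), or NULL.
  `realloc(p, 0)`: `r16 0 = 0 ≤ c`: p itself, shrunk to size 0 in place (never NULL, p stays live). So for `realloc`:
  rax = 0 ⇔ failure ⇔ the old object is still live and untouched, without exception.

  STACK (by hand against c/heap/heaptest.dis; `frame` = the bytes below the return address, with everything called):
      function           own                       callees (frame)                                          frame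
      heap_live_size     sub 8                     — (the four calls of the report routine are never taken)      8
      heap_product_ok    —                         —                                                             0
      heap_alloc         push rbx = 8              arena_unpoison (0)                                  8 + 8 + 0 = 16
      malloc             sub 8                     heap_alloc (16)                                    8 + 8 + 16 = 32
      free               push rbx = 8              heap_live_size (8), arena_poison (0)                8 + 8 + 8 = 24
      calloc             2 pushes + sub 8 = 24     heap_product_ok (0), malloc (32), memset (64)      24 + 8 + 64 = 96
      realloc            4 pushes + sub 8 = 40     heap_live_size (8), heap_alloc (16), malloc (32), memcpy (80), free (24),
                                                   arena_poison / arena_unpoison (0)                  40 + 8 + 80 = 128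
      reallocarray       3 pushes = 24             heap_product_ok (0), realloc (128)                 24 + 8 + 128 = 160
-/
import Asan.Heap
import ProgX.Spec.Runtime
import ProgX.Spec.Libc
namespace ProgX.Spec
open X86 X86.User Asan

/-! ### 0. Live ranges of a client, through `malloc`, `free` and an in-place `realloc` (from Asan/Heap.lean §7 of agent GA) -/

/-- **A range inside a live heap object is live** (the `LiveIn` a callee's contract asks for). -/
theorem _root_.Asan.Heap.Live.liveIn {H : Heap} {p n : Nat} (h : H.Live p n) (rest : List Obj) (frames : List (Nat × FrameLayout))
    {a k : Nat} (h1 : p ≤ a) (h2 : a + k ≤ p + n) : LiveIn (H.liveObjs ++ rest) frames a k :=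
  LiveIn.of_other (o := ⟨p, n, .heap⟩) (List.mem_append_left _ h.mem_liveObjs) h1 h2

/-- **An allocation keeps every live range live.** -/
theorem _root_.ProgX.LiveIn.heap_push {H : Heap} {rest : List Obj} {frames : List (Nat × FrameLayout)} {a k : Nat}
    (h : LiveIn (H.liveObjs ++ rest) frames a k) (n c : Nat) : LiveIn ((H.push n c).liveObjs ++ rest) frames a k := by
  apply h.mono_others
  intro o ho
  rw [Heap.liveObjs_push]
  exact List.mem_cons_of_mem _ ho

/-- **`free(p)` keeps every live range that does not lie in the freed object** (`k ≥ 1`: an empty range lies in everything). The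
range is given off the freed object's bytes; that it cannot lie in ANOTHER object with the same base is `HeapOK.base_inj`. -/
theorem _root_.ProgX.LiveIn.heap_release {H : Heap} {mem : Mem} {rest : List Obj} {frames : List (Nat × FrameLayout)} {a k p n : Nat}
    (h : LiveIn (H.liveObjs ++ rest) frames a k) (hok : HeapOK H mem) (hl : H.Live p n) (hk : 0 < k)
    (hout : a + k ≤ p ∨ p + n ≤ a) :
    LiveIn ((H.release p).liveObjs ++ rest) frames a k := by
  obtain ⟨o, ho, k1, k2⟩ := h
  refine ⟨o, ?_, k1, k2⟩
  rcases List.mem_append.mp ho with hs | hoth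
  · exact List.mem_append_left _ hs
  · apply List.mem_append_right
    rcases List.mem_append.mp hoth with hheap | hr
    · apply List.mem_append_left
      apply Heap.mem_liveObjs_release.mpr
      refine ⟨hheap, ?_⟩
      intro hb
      obtain ⟨hlo, _⟩ := Heap.live_of_mem_liveObjs hheap
      have hsz := hok.live_size hl (hb ▸ hlo)
      omega
    · exact List.mem_append_right _ hr

/-- **An in-place `realloc(p, m)` keeps every live range that does not lie in the resized object, and every range inside its new
size.** -/
theorem _root_.ProgX.LiveIn.heap_resize {H : Heap} {mem : Mem} {rest : List Obj} {frames : List (Nat × FrameLayout)} {a k p n m : Nat}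
    (h : LiveIn (H.liveObjs ++ rest) frames a k) (hok : HeapOK H mem) (hl : H.Live p n) (hk : 0 < k)
    (hout : a + k ≤ p ∨ p + n ≤ a ∨ (p ≤ a ∧ a + k ≤ p + m)) :
    LiveIn ((H.resize p m).liveObjs ++ rest) frames a k := by
  obtain ⟨o, ho, k1, k2⟩ := h
  rcases List.mem_append.mp ho with hs | hoth
  · exact ⟨o, List.mem_append_left _ hs, k1, k2⟩
  · rcases List.mem_append.mp hoth with hheap | hr
    · obtain ⟨hlo, hko⟩ := Heap.live_of_mem_liveObjs hheap
      by_cases hb : o.base = p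
      · have hsz := hok.live_size hl (hb ▸ hlo)
        have hin : p ≤ a ∧ a + k ≤ p + m := by omega
        exact (Heap.live_resize hl m).liveIn rest frames hin.1 hin.2
      · refine ⟨o, ?_, k1, k2⟩
        apply List.mem_append_right
        apply List.mem_append_left
        exact Heap.mem_liveObjs_of_live (hlo.resize_ne hb m) hko
    · exact ⟨o, List.mem_append_right _ (List.mem_append_right _ hr), k1, k2⟩


/-- **The common precondition of the heap's functions**: the heap's invariant with the clean stack ending at the caller's stack
pointer; the heap is the region heap.c is compiled for; the text ends below it and below every other live object. -/
structure HeapPre (T : Text) (H : Heap) (rest : List Obj) (frames : List (Nat × FrameLayout)) (u : State) : Prop where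
  inv : HeapInv H rest frames ((u.reg .rsp).toNat + 8) u.mem
  /-- HEAP_BASE of heap.c -/
  base : H.base = 0x800000
  /-- HEAP_LIMIT of heap.c -/
  limit : H.limit = 0xC00000
  /-- the image's text lies below every heap (link scripts end the image below 1F0000H) -/
  text : T.hi ≤ 0x200000
  offText : ∀ o, o ∈ rest → T.hi ≤ o.base

namespace HeapPre
variable {T : Text} {H : Heap} {rest : List Obj} {frames : List (Nat × FrameLayout)} {u : State}

/-- No live object — heap object or other — lies in the text. -/
theorem offText_all (h : HeapPre T H rest frames u) : ∀ o, o ∈ H.liveObjs ++ rest → T.hi ≤ o.base := by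
  intro o ho
  rcases List.mem_append.mp ho with hheap | hr
  · obtain ⟨⟨c, hl⟩, _⟩ := Heap.live_of_mem_liveObjs hheap
    have := h.inv.heap.obj_inside hl
    have ht := h.text
    simp only at this
    omega
  · exact h.offText o hr

/-- **The shadow clause every other contract asks for**, over the live list `H.liveObjs ++ rest`. -/
theorem shadowPre (h : HeapPre T H rest frames u) : ShadowPre T (H.liveObjs ++ rest) frames u :=
  ⟨h.inv.shadow, h.offText_all⟩

/-- The precondition for another heap at the same place (after a transition), from the invariant at the same stack pointer. -/
theorem of_inv {H' : Heap} {v : State} (h : HeapPre T H rest frames u)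
    (hinv : HeapInv H' rest frames ((v.reg .rsp).toNat + 8) v.mem) (hb : H'.base = H.base) (hl : H'.limit = H.limit) :
    HeapPre T H' rest frames v :=
  ⟨hinv, by rw [hb]; exact h.base, by rw [hl]; exact h.limit, h.text, h.offText⟩

/-- **The precondition at a callee's entry, from the caller's own** (the `pre_<addr>` goal of a call of a heap function, or of any
function that takes `HeapPre`): no store of the caller so far went to the shadow or into the heap's region, the callee is entered
with a lower stack pointer, still 8-aligned and inside the stack region. -/
theorem callee {v : State} (h : HeapPre T H rest frames u) (hun : ShadowUntouched u.mem v.mem)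
    (hsame : Mem.EqOn H.base H.limit u.mem v.mem) (hle : (v.reg .rsp).toNat ≤ (u.reg .rsp).toNat)
    (h8 : (v.reg .rsp).toNat % 8 = 0) (hlo : 0x700000 ≤ (v.reg .rsp).toNat + 8) : HeapPre T H rest frames v :=
  ⟨(h.inv.eqOn hun hsame).lower (by omega) (by omega) hlo, h.base, h.limit, h.text, h.offText⟩

/-- **Back at the caller's stack pointer**: the invariant a callee's post states at ITS `rsp + 8` (below the caller's), restated at
the caller's `rsp + 8` (every active protected frame lies at or above it: the pre says so). -/
theorem raise_back {H' : Heap} {t : Nat} {mem : Mem} (h : HeapPre T H rest frames u) (k : HeapInv H' rest frames t mem)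
    (ht : t ≤ (u.reg .rsp).toNat + 8) : HeapInv H' rest frames ((u.reg .rsp).toNat + 8) mem := by
  have hst := h.inv.shadow.stack
  refine k.raise ht hst.aligned hst.hi ?_
  intro bF hbF
  exact (hst.active bF hbF).2.2.1

end HeapPre

/-! ### The contracts -/

/-- **`heap_live_size(rdi = p)`** (static): `p` is the start of the live object `(p, n)`. Returns `n`; writes nothing (its
`sub rsp, 8` reserves the slot a call of the report routine would push into: never used). -/
def heap_live_size.spec (H : Heap) (n : Nat) : Spec where
  pre u := HeapOK H u.mem ∧ H.base = 0x800000 ∧ H.Live (u.reg .rdi).toNat n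
  post u v := (v.reg .rax).toNat = n ∧ v.mem = u.mem
  frame := 8
  writes _ := []

@[vspec] theorem heap_live_size.spec_frame (H : Heap) (n : Nat) : (heap_live_size.spec H n).frame = 8 := id rfl
@[vspec] theorem heap_live_size.spec_writes (H : Heap) (n : Nat) (u : State) : (heap_live_size.spec H n).writes u = [] := id rfl

/-- **`heap_product_ok(rdi = k, rsi = s)`** (static): answers 1 if a factor is 0 or both are at most `ROOM = 3FFFE0H`, else 0. A
leaf without a frame; nothing is written. -/
def heap_product_ok.spec : Spec where
  pre _ := True
  post u v :=
    v.mem = u.mem ∧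
    (((u.reg .rdi).toNat = 0 ∨ (u.reg .rsi).toNat = 0 ∨ ((u.reg .rdi).toNat ≤ 0x3FFFE0 ∧ (u.reg .rsi).toNat ≤ 0x3FFFE0)) →
      (v.reg .rax).toNat % 2 ^ 32 = 1) ∧
    (¬ ((u.reg .rdi).toNat = 0 ∨ (u.reg .rsi).toNat = 0 ∨ ((u.reg .rdi).toNat ≤ 0x3FFFE0 ∧ (u.reg .rsi).toNat ≤ 0x3FFFE0)) →
      (v.reg .rax).toNat % 2 ^ 32 = 0)
  frame := 0
  writes _ := []

@[vspec] theorem heap_product_ok.spec_frame : heap_product_ok.spec.frame = 0 := id rfl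
@[vspec] theorem heap_product_ok.spec_writes (u : State) : heap_product_ok.spec.writes u = [] := id rfl

/-- **The postcondition of a FAILED allocation** (every NULL arm of a client is reachable: this must be as usable as success):
rax = 0; the heap's invariant for the SAME heap; no shadow byte written; and NOTHING was written but the `F` bytes of stack below
the return address (`F` the contract's frame): not the control cell, not a header, not an object. -/
def FailPost (H : Heap) (rest : List Obj) (frames : List (Nat × FrameLayout)) (F : Nat) (u v : State) : Prop :=
  v.reg .rax = 0 ∧
  HeapInv H rest frames ((u.reg .rsp).toNat + 8) v.mem ∧
  ShadowUntouched u.mem v.mem ∧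
  Mem.SameExcept [⟨(u.reg .rsp).toNat - F, (u.reg .rsp).toNat⟩] u.mem v.mem

/-- The postcondition of an allocation of `n` bytes with capacity `c` that frees nothing: success is decided by `H.Fits c`. Success:
rax is the new object `H.next` (16-aligned, `≠ 0`), the heap is `H.push n c`: one more live object of EXACTLY `n` bytes, its contents
arbitrary, above everything that was ever allocated (`HeapOK.next_above`). -/
def AllocPost (H : Heap) (rest : List Obj) (frames : List (Nat × FrameLayout)) (F n c : Nat) (u v : State) : Prop :=
  (H.Fits c →
    (v.reg .rax).toNat = H.next ∧
    HeapInv (H.push n c) rest frames ((u.reg .rsp).toNat + 8) v.mem) ∧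
  (¬ H.Fits c → FailPost H rest frames F u v)

/-- **`heap_alloc(rdi = n, rsi = c)`** (static): a new chunk of capacity `c` (a multiple of 16, at least `r16 n`, small enough not to
wrap) for an object of `n` bytes. Footprint: the control cell, the new header, the shadow of the new object, 16 bytes of stack. -/
def heap_alloc.spec (T : Text) (H : Heap) (rest : List Obj) (frames : List (Nat × FrameLayout)) : Spec where
  pre u :=
    HeapPre T H rest frames u ∧ r16 (u.reg .rdi).toNat ≤ (u.reg .rsi).toNat ∧ (u.reg .rsi).toNat % 16 = 0 ∧
    (u.reg .rsi).toNat ≤ 0x1000000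
  post u v := AllocPost H rest frames 16 (u.reg .rdi).toNat (u.reg .rsi).toNat u v
  frame := 16
  writes u :=
    [⟨0x800000, 0x800008⟩,
     ⟨H.next - 32, H.next - 8⟩,
     shadowSpan H.next (H.next + (u.reg .rdi).toNat)]

@[vspec] theorem heap_alloc.spec_frame (T : Text) (H : Heap) (rest : List Obj) (frames : List (Nat × FrameLayout)) :
    (heap_alloc.spec T H rest frames).frame = 16 := id rfl

@[vspec] theorem heap_alloc.spec_writes (T : Text) (H : Heap) (rest : List Obj) (frames : List (Nat × FrameLayout)) (u : State) :
    (heap_alloc.spec T H rest frames).writes u =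
      [⟨0x800000, 0x800008⟩,
       ⟨H.next - 32, H.next - 8⟩,
       shadowSpan H.next (H.next + (u.reg .rdi).toNat)] := id rfl

/-- **`malloc(rdi = n)`**: TOTAL. `H.Fits (r16 n)`: returns the new object `H.next`, the heap is `H.push n (r16 n)`. Otherwise
returns 0 and nothing but stack was written (`FailPost`). Footprint: the control cell, the new header, the shadow of the new
object, 32 bytes of stack. -/
def malloc.spec (T : Text) (H : Heap) (rest : List Obj) (frames : List (Nat × FrameLayout)) : Spec where
  pre u := HeapPre T H rest frames u
  post u v := AllocPost H rest frames 32 (u.reg .rdi).toNat (r16 (u.reg .rdi).toNat) u v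
  frame := 32
  writes u :=
    [⟨0x800000, 0x800008⟩,
     ⟨H.next - 32, H.next - 8⟩,
     shadowSpan H.next (H.next + (u.reg .rdi).toNat)]

@[vspec] theorem malloc.spec_frame (T : Text) (H : Heap) (rest : List Obj) (frames : List (Nat × FrameLayout)) :
    (malloc.spec T H rest frames).frame = 32 := id rfl

@[vspec] theorem malloc.spec_writes (T : Text) (H : Heap) (rest : List Obj) (frames : List (Nat × FrameLayout)) (u : State) :
    (malloc.spec T H rest frames).writes u =
      [⟨0x800000, 0x800008⟩,
       ⟨H.next - 32, H.next - 8⟩,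
       shadowSpan H.next (H.next + (u.reg .rdi).toNat)] := id rfl

/-- **`calloc(rdi = k, rsi = s)`**: as `malloc(k · s)` — the product of the NUMBERS; `heap_product_ok` refuses a pair whose product
may not fit 64 bits, and such a product does not fit the heap — and the `k · s` bytes of the new object are 0. -/
def calloc.spec (T : Text) (H : Heap) (rest : List Obj) (frames : List (Nat × FrameLayout)) : Spec where
  pre u := HeapPre T H rest frames u
  post u v :=
    AllocPost H rest frames 96 ((u.reg .rdi).toNat * (u.reg .rsi).toNat) (r16 ((u.reg .rdi).toNat * (u.reg .rsi).toNat)) u v ∧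
    (H.Fits (r16 ((u.reg .rdi).toNat * (u.reg .rsi).toNat)) →
      ∀ i, i < (u.reg .rdi).toNat * (u.reg .rsi).toNat → v.mem.readLE (UInt64.ofNat (H.next + i)) 1 = 0)
  frame := 96
  writes u :=
    [⟨0x800000, 0x800008⟩,
     ⟨H.next - 32, H.next - 8⟩,
     shadowSpan H.next (H.next + (u.reg .rdi).toNat * (u.reg .rsi).toNat),
     ⟨H.next, H.next + (u.reg .rdi).toNat * (u.reg .rsi).toNat⟩]

@[vspec] theorem calloc.spec_frame (T : Text) (H : Heap) (rest : List Obj) (frames : List (Nat × FrameLayout)) :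
    (calloc.spec T H rest frames).frame = 96 := id rfl

@[vspec] theorem calloc.spec_writes (T : Text) (H : Heap) (rest : List Obj) (frames : List (Nat × FrameLayout)) (u : State) :
    (calloc.spec T H rest frames).writes u =
      [⟨0x800000, 0x800008⟩,
       ⟨H.next - 32, H.next - 8⟩,
       shadowSpan H.next (H.next + (u.reg .rdi).toNat * (u.reg .rsi).toNat),
       ⟨H.next, H.next + (u.reg .rdi).toNat * (u.reg .rsi).toNat⟩] := id rfl

/-- **`free(rdi = p)`**: `p` is NULL, or the start of the LIVE object `(p, n)` of `H` (anything else goes to the report routine: a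
double free, an interior pointer, a pointer that never came from the heap). NULL: nothing happens. Otherwise the heap is
`H.release p`: that object is freed — poisoned, its chunk never to be handed out again —, every other object is as it was: live
(`Heap.Live.release_ne`), at its address, with its bytes (`free_keeps`). Footprint: the state word of the header, the shadow of the
object, 24 bytes of stack. -/
def free.spec (T : Text) (H : Heap) (rest : List Obj) (frames : List (Nat × FrameLayout)) (n : Nat) : Spec where
  pre u := HeapPre T H rest frames u ∧ ((u.reg .rdi).toNat = 0 ∨ H.Live (u.reg .rdi).toNat n)
  post u v :=
    ((u.reg .rdi).toNat = 0 →
      HeapInv H rest frames ((u.reg .rsp).toNat + 8) v.mem ∧ ShadowUntouched u.mem v.mem) ∧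
    ((u.reg .rdi).toNat ≠ 0 →
      HeapInv (H.release (u.reg .rdi).toNat) rest frames ((u.reg .rsp).toNat + 8) v.mem)
  frame := 24
  writes u :=
    [⟨(u.reg .rdi).toNat - 24, (u.reg .rdi).toNat - 16⟩,
     shadowSpan (u.reg .rdi).toNat ((u.reg .rdi).toNat + n)]

@[vspec] theorem free.spec_frame (T : Text) (H : Heap) (rest : List Obj) (frames : List (Nat × FrameLayout)) (n : Nat) :
    (free.spec T H rest frames n).frame = 24 := id rfl

@[vspec] theorem free.spec_writes (T : Text) (H : Heap) (rest : List Obj) (frames : List (Nat × FrameLayout)) (n : Nat)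
    (u : State) :
    (free.spec T H rest frames n).writes u =
      [⟨(u.reg .rdi).toNat - 24, (u.reg .rdi).toNat - 16⟩,
       shadowSpan (u.reg .rdi).toNat ((u.reg .rdi).toNat + n)] := id rfl

/-- **`free(p)` keeps the bytes of every other object** (live or freed: anything with another base), and of everything outside the
heap, the shadow and the callee's stack frame: what its footprint says, spelled out for a client's ownership argument. -/
theorem free_keeps {K : Conv} {T : Text} {H : Heap} {rest : List Obj} {frames : List (Nat × FrameLayout)} {n : Nat}
    {u v : State} {ret : Word} (hr : Returned K (free.spec T H rest frames n) u ret v)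
    (hpre : (free.spec T H rest frames n).pre u) {o : HObj} (ho : o ∈ H.objs) (hne : o.base ≠ (u.reg .rdi).toNat) :
    Mem.EqOn o.base (o.base + o.cap) u.mem v.mem := by
  obtain ⟨hp, hcase⟩ := hpre
  have hrange := hp.inv.heap.obj_range ho
  have hinside := hp.inv.heap.obj_inside ho
  have hsp := hp.inv.shadow.stack.hi
  have hoff := hp.inv.heap.offStack
  have hroom := hp.inv.heap.room
  rw [hp.base] at hrange hoff hroom
  rw [hp.limit] at hoff hroom
  apply hr.eqOn
  intro w hw
  unfold Spec.footprint at hw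
  rw [free.spec_frame, free.spec_writes] at hw
  rcases List.mem_cons.mp hw with rfl | hw
  · simp only
    omega
  · rcases List.mem_cons.mp hw with rfl | hw
    · simp only
      rcases hcase with h0 | hl
      · omega
      · obtain ⟨c, hl⟩ := hl
        have hap := hp.inv.heap.apart_of_base_ne ho hl hne
        simp only at hap
        omega
    · have e : w = shadowSpan (u.reg .rdi).toNat ((u.reg .rdi).toNat + n) := List.mem_singleton.mp hw
      subst e
      unfold shadowSpan
      simp only
      omega

/-- The capacity a moving `realloc` to `m` bytes asks for: twice the rounded size, or the rounded size if twice does not fit. -/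
def _root_.Asan.Heap.moveCap (H : Heap) (m : Nat) : Nat := if H.Fits (2 * r16 m) then 2 * r16 m else r16 m

/-- A moving `realloc` succeeds exactly when the rounded size fits. -/
theorem _root_.Asan.Heap.fits_moveCap (H : Heap) (m : Nat) : H.Fits (H.moveCap m) ↔ H.Fits (r16 m) := by
  unfold Heap.moveCap
  by_cases h2 : H.Fits (2 * r16 m)
  · rw [if_pos h2]
    unfold Heap.Fits at h2 ⊢
    constructor
    · intro _
      omega
    · intro _
      exact h2
  · rw [if_neg h2]

/-- The postcondition of `realloc(p, m)` for the live object `(p, n)` of capacity `c`, `p ≠ 0`. THREE outcomes, decided by the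
ghost state:
  IN PLACE (`r16 m ≤ c`): rax = p; the heap is `H.resize p m`; no byte of `[p, p + c)` was written.
  MOVED (`c < r16 m`, and `r16 m` fits): rax = `H.next`; the heap is `(H.push m c').release p` with `c' = H.moveCap m`; the `n` bytes
    of the old object (`n < m` here) were copied to the new one; the old one is freed.
  FAILED (`c < r16 m`, and `r16 m` does not fit): `FailPost`: rax = 0, the heap is `H`, the old object is live and untouched. -/
def ReallocPost (H : Heap) (rest : List Obj) (frames : List (Nat × FrameLayout)) (F p n c m : Nat) (u v : State) : Prop :=
  (r16 m ≤ c →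
    (v.reg .rax).toNat = p ∧
    HeapInv (H.resize p m) rest frames ((u.reg .rsp).toNat + 8) v.mem ∧
    Mem.EqOn p (p + c) u.mem v.mem) ∧
  (c < r16 m → H.Fits (r16 m) →
    (v.reg .rax).toNat = H.next ∧
    HeapInv ((H.push m (H.moveCap m)).release p) rest frames ((u.reg .rsp).toNat + 8) v.mem ∧
    ∀ i, i < n → v.mem.readLE (UInt64.ofNat (H.next + i)) 1 = u.mem.readLE (UInt64.ofNat (p + i)) 1) ∧
  (c < r16 m → ¬ H.Fits (r16 m) → FailPost H rest frames F u v)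

/-- **`realloc(rdi = p, rsi = m)`**: `p` is NULL — then it is `malloc(m)` — or the start of the live object `(p, n)` of capacity
`c`. `m = 0` is not special (C11 leaves it to the implementation): `r16 0 = 0 ≤ c`, so the object shrinks to size 0 in place. So
rax = 0 means failure, and then the old object is untouched, for EVERY `m`. -/
def realloc.spec (T : Text) (H : Heap) (rest : List Obj) (frames : List (Nat × FrameLayout)) (n c : Nat) : Spec where
  pre u := HeapPre T H rest frames u ∧ ((u.reg .rdi).toNat = 0 ∨ H.LiveCap (u.reg .rdi).toNat n c)
  post u v :=
    ((u.reg .rdi).toNat = 0 → AllocPost H rest frames 128 (u.reg .rsi).toNat (r16 (u.reg .rsi).toNat) u v) ∧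
    ((u.reg .rdi).toNat ≠ 0 → ReallocPost H rest frames 128 (u.reg .rdi).toNat n c (u.reg .rsi).toNat u v)
  frame := 128
  writes u :=
    [⟨0x800000, 0x800008⟩,
     ⟨H.next - 32, H.next - 8⟩,
     shadowSpan H.next (H.next + (u.reg .rsi).toNat),
     ⟨H.next, H.next + (u.reg .rsi).toNat⟩,
     ⟨(u.reg .rdi).toNat - 32, (u.reg .rdi).toNat - 16⟩,
     shadowSpan (u.reg .rdi).toNat ((u.reg .rdi).toNat + c)]

@[vspec] theorem realloc.spec_frame (T : Text) (H : Heap) (rest : List Obj) (frames : List (Nat × FrameLayout)) (n c : Nat) :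
    (realloc.spec T H rest frames n c).frame = 128 := id rfl

@[vspec] theorem realloc.spec_writes (T : Text) (H : Heap) (rest : List Obj) (frames : List (Nat × FrameLayout)) (n c : Nat)
    (u : State) :
    (realloc.spec T H rest frames n c).writes u =
      [⟨0x800000, 0x800008⟩,
       ⟨H.next - 32, H.next - 8⟩,
       shadowSpan H.next (H.next + (u.reg .rsi).toNat),
       ⟨H.next, H.next + (u.reg .rsi).toNat⟩,
       ⟨(u.reg .rdi).toNat - 32, (u.reg .rdi).toNat - 16⟩,
       shadowSpan (u.reg .rdi).toNat ((u.reg .rdi).toNat + c)] := id rfl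

/-- **`reallocarray(rdi = p, rsi = k, rdx = s)`**: `realloc(p, k · s)` with the product of the NUMBERS. If both factors are non-zero
and one exceeds `ROOM`, the product exceeds `ROOM`: it fits neither the heap nor any capacity, and NULL is returned without
computing it (`FailPost`: the old object untouched); otherwise the machine's 64-bit product is exact. -/
def reallocarray.spec (T : Text) (H : Heap) (rest : List Obj) (frames : List (Nat × FrameLayout)) (n c : Nat) : Spec where
  pre u := HeapPre T H rest frames u ∧ ((u.reg .rdi).toNat = 0 ∨ H.LiveCap (u.reg .rdi).toNat n c)
  post u v :=
    ((u.reg .rdi).toNat = 0 →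
      AllocPost H rest frames 160 ((u.reg .rsi).toNat * (u.reg .rdx).toNat) (r16 ((u.reg .rsi).toNat * (u.reg .rdx).toNat)) u v) ∧
    ((u.reg .rdi).toNat ≠ 0 →
      ReallocPost H rest frames 160 (u.reg .rdi).toNat n c ((u.reg .rsi).toNat * (u.reg .rdx).toNat) u v)
  frame := 160
  writes u :=
    [⟨0x800000, 0x800008⟩,
     ⟨H.next - 32, H.next - 8⟩,
     shadowSpan H.next (H.next + (u.reg .rsi).toNat * (u.reg .rdx).toNat),
     ⟨H.next, H.next + (u.reg .rsi).toNat * (u.reg .rdx).toNat⟩,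
     ⟨(u.reg .rdi).toNat - 32, (u.reg .rdi).toNat - 16⟩,
     shadowSpan (u.reg .rdi).toNat ((u.reg .rdi).toNat + c)]

@[vspec] theorem reallocarray.spec_frame (T : Text) (H : Heap) (rest : List Obj) (frames : List (Nat × FrameLayout))
    (n c : Nat) : (reallocarray.spec T H rest frames n c).frame = 160 := id rfl

@[vspec] theorem reallocarray.spec_writes (T : Text) (H : Heap) (rest : List Obj) (frames : List (Nat × FrameLayout))
    (n c : Nat) (u : State) :
    (reallocarray.spec T H rest frames n c).writes u =
      [⟨0x800000, 0x800008⟩,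
       ⟨H.next - 32, H.next - 8⟩,
       shadowSpan H.next (H.next + (u.reg .rsi).toNat * (u.reg .rdx).toNat),
       ⟨H.next, H.next + (u.reg .rsi).toNat * (u.reg .rdx).toNat⟩,
       ⟨(u.reg .rdi).toNat - 32, (u.reg .rdi).toNat - 16⟩,
       shadowSpan (u.reg .rdi).toNat ((u.reg .rdi).toNat + c)] := id rfl

/-- **WHAT A CLIENT OF `realloc` / `reallocarray` CASE-SPLITS ON**: the result is the same address with the new size, or a new
object with the old one freed, or NULL with the old object still live — and nothing else. -/
theorem ReallocPost.cases {H : Heap} {rest : List Obj} {frames : List (Nat × FrameLayout)} {F p n c m : Nat} {u v : State}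
    (h : ReallocPost H rest frames F p n c m u v) :
    ((v.reg .rax).toNat = p ∧ HeapInv (H.resize p m) rest frames ((u.reg .rsp).toNat + 8) v.mem) ∨
    ((v.reg .rax).toNat = H.next ∧ ∃ c', HeapInv ((H.push m c').release p) rest frames ((u.reg .rsp).toNat + 8) v.mem) ∨
    (v.reg .rax = 0 ∧ HeapInv H rest frames ((u.reg .rsp).toNat + 8) v.mem) := by
  obtain ⟨h1, h2, h3⟩ := h
  by_cases hc : r16 m ≤ c
  · obtain ⟨k1, k2, _⟩ := h1 hc
    exact Or.inl ⟨k1, k2⟩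
  · by_cases hf : H.Fits (r16 m)
    · obtain ⟨k1, k2, _⟩ := h2 (by omega) hf
      exact Or.inr (Or.inl ⟨k1, _, k2⟩)
    · obtain ⟨k1, k2, _⟩ := h3 (by omega) hf
      exact Or.inr (Or.inr ⟨k1, k2⟩)

/-! ### Passing a post upwards: a wrapper's post from its callee's

A function that calls a heap function and returns its result (`malloc` around `heap_alloc`, `reallocarray` around `realloc`, a
client's own allocation helper) has pushed registers and a return address before the call: the callee's post speaks of the callee's
entry state `s` (its `rsp`, its memory), the wrapper's post of the wrapper's entry state `u`. What relates the two: no shadow byte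
and nothing but the wrapper's own stack frame was written between `u` and `s`; the callee's frame lies inside the wrapper's; the
state `v'` after the wrapper's `ret` has the memory and the rax of the callee's returned state `v`. -/

section Wrap
variable {T : Text} {H : Heap} {rest : List Obj} {frames : List (Nat × FrameLayout)} {F F' : Nat} {u s v v' : State}

/-- A failed allocation, seen from the wrapper. -/
theorem FailPost.wrap (h : FailPost H rest frames F s v) (hpre : HeapPre T H rest frames u)
    (hun : ShadowUntouched u.mem s.mem)
    (hstack : Mem.SameExcept [⟨(u.reg .rsp).toNat - F', (u.reg .rsp).toNat⟩] u.mem s.mem)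
    (hle : (s.reg .rsp).toNat ≤ (u.reg .rsp).toNat) (hF : (u.reg .rsp).toNat - F' ≤ (s.reg .rsp).toNat - F)
    (hmem : v'.mem = v.mem) (hrax : v'.reg .rax = v.reg .rax) : FailPost H rest frames F' u v' := by
  obtain ⟨k1, k2, k3, k4⟩ := h
  refine ⟨by rw [hrax]; exact k1, ?_, ?_, ?_⟩
  · rw [hmem]
    exact hpre.raise_back k2 (by omega)
  · rw [hmem]
    exact hun.trans k3
  · rw [hmem]
    refine hstack.trans (k4.mono ?_)
    intro w hw a h1 h2
    have e : w = ⟨(s.reg .rsp).toNat - F, (s.reg .rsp).toNat⟩ := List.mem_singleton.mp hw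
    subst e
    refine ⟨_, List.mem_singleton.mpr rfl, ?_, ?_⟩
    · show (u.reg .rsp).toNat - F' ≤ a
      have : (s.reg .rsp).toNat - F ≤ a := h1
      omega
    · show a < (u.reg .rsp).toNat
      have : a < (s.reg .rsp).toNat := h2
      omega

/-- An allocation that frees nothing, seen from the wrapper. -/
theorem AllocPost.wrap {n c : Nat} (h : AllocPost H rest frames F n c s v) (hpre : HeapPre T H rest frames u)
    (hun : ShadowUntouched u.mem s.mem)
    (hstack : Mem.SameExcept [⟨(u.reg .rsp).toNat - F', (u.reg .rsp).toNat⟩] u.mem s.mem)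
    (hle : (s.reg .rsp).toNat ≤ (u.reg .rsp).toNat) (hF : (u.reg .rsp).toNat - F' ≤ (s.reg .rsp).toNat - F)
    (hmem : v'.mem = v.mem) (hrax : v'.reg .rax = v.reg .rax) : AllocPost H rest frames F' n c u v' := by
  refine ⟨fun hfit => ?_, fun hnf => (h.2 hnf).wrap hpre hun hstack hle hF hmem hrax⟩
  obtain ⟨k1, k2⟩ := h.1 hfit
  refine ⟨by rw [hrax]; exact k1, ?_⟩
  rw [hmem]
  exact hpre.raise_back k2 (by omega)

/-- A `realloc`, seen from the wrapper. -/
theorem ReallocPost.wrap {p n c m : Nat} (h : ReallocPost H rest frames F p n c m s v) (hpre : HeapPre T H rest frames u)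
    (hl : H.LiveCap p n c) (hun : ShadowUntouched u.mem s.mem)
    (hstack : Mem.SameExcept [⟨(u.reg .rsp).toNat - F', (u.reg .rsp).toNat⟩] u.mem s.mem)
    (hle : (s.reg .rsp).toNat ≤ (u.reg .rsp).toNat) (hF : (u.reg .rsp).toNat - F' ≤ (s.reg .rsp).toNat - F)
    (hmem : v'.mem = v.mem) (hrax : v'.reg .rax = v.reg .rax) : ReallocPost H rest frames F' p n c m u v' := by
  obtain ⟨h1, h2, h3⟩ := h
  have hi := hpre.inv.heap.obj_inside hl
  have hr := hpre.inv.heap.obj_range hl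
  have hsc := hpre.inv.heap.size_le_cap hl
  have hsp := hpre.inv.shadow.stack.hi
  have hoff := hpre.inv.heap.offStack
  have hroom := hpre.inv.heap.room
  simp only at hi hr hsc
  rw [hpre.base] at hr hoff hroom
  rw [hpre.limit] at hoff hroom
  -- the object's bytes are off the wrapper's stack frame
  have hobj : Mem.EqOn p (p + c) u.mem s.mem := by
    apply hstack.eqOn
    intro w hw
    have e : w = ⟨(u.reg .rsp).toNat - F', (u.reg .rsp).toNat⟩ := List.mem_singleton.mp hw
    subst e
    simp only
    omega
  refine ⟨fun hc => ?_, fun hc hfit => ?_, fun hc hnf => (h3 hc hnf).wrap hpre hun hstack hle hF hmem hrax⟩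
  · obtain ⟨k1, k2, k3⟩ := h1 hc
    refine ⟨by rw [hrax]; exact k1, ?_, ?_⟩
    · rw [hmem]
      exact hpre.raise_back k2 (by omega)
    · rw [hmem]
      exact hobj.trans k3
  · obtain ⟨k1, k2, k3⟩ := h2 hc hfit
    refine ⟨by rw [hrax]; exact k1, ?_, ?_⟩
    · rw [hmem]
      exact hpre.raise_back k2 (by omega)
    · intro i hi'
      rw [hmem, k3 i hi']
      have e : (UInt64.ofNat (p + i)).toNat = p + i := toNat_ofNat_lt' _ (by omega)
      exact hobj.readLE (UInt64.ofNat (p + i)) 1 (by omega) (by omega) (by omega)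

end Wrap

end ProgX.Spec
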